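-- pv_equiv track=rewrite | github.com/jaysooo/Algorithm | company/sk_exam/TimeReturn/main.py | getMaxPosition
-- ===== SOURCE A (Python) =====
-- def getMaxPosition(_arr,maxNum):
--     tmpMax=0
--     tmpIdx=0
--     for idx,val in enumerate(_arr):
--         if val >= tmpMax and val <=maxNum:
--             tmpMax=val
--             tmpIdx=idx
--
--     return tmpIdx
-- ===== SOURCE B (Python) =====
-- def getMaxPosition(_arr, maxNum):
--     # two passes: find the target value, then its last position
--     cand = [v for v in _arr if 0 <= v <= maxNum]
--     if not cand:
--         return 0
--     M = max(cand)
--     i = len(_arr) - 1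
--     while i >= 0:
--         if _arr[i] == M:
--             return i
--         i -= 1
--     return 0
-- ===== Notes on version B (the rewrite author's own statement) =====
-- stated objective: alternative
-- what changed: Replaces A's single interleaved running-max/running-index scan with a two-phase decomposition: first compute the eligible maximum value (filter 0<=v<=maxNum, then max), then scan backwards from the end for its last position.
import Mathlib
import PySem

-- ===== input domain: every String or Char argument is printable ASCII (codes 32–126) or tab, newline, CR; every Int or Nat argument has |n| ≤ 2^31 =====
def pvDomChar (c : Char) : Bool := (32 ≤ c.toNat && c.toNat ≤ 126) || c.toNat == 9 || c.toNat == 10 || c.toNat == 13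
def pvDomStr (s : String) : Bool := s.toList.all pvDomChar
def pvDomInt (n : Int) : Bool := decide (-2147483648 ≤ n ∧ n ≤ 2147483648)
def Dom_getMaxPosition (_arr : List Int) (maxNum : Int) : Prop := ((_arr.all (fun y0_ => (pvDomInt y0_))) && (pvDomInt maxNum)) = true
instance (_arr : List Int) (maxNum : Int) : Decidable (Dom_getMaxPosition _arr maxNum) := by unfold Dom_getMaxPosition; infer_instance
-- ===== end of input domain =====

-- B changes the decomposition only (same cost): value first, then its last index; return value equivalence.

-- ===== PORT A =====
-- single forward scan with running (tmpMax, tmpIdx), seeded (0, 0)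
def getMaxPosition (_arr : List Int) (maxNum : Int) : Int :=
  ((PySem.List.enumerate _arr 0).foldl
    (fun (st : Int × Int) (p : Int × Int) =>
      if p.2 ≥ st.1 ∧ p.2 ≤ maxNum then (p.2, p.1) else st) (0, 0)).2

-- ===== PORT B =====
-- the backward 'while i >= 0' scan of Source B, fuel = number of indices still to check
def bScan (arr : List Int) (M : Int) : Nat → Int
  | 0 => 0
  | n + 1 => if arr.getD n 0 = M then (n : Int) else bScan arr M n

def getMaxPosition_alt (_arr : List Int) (maxNum : Int) : Int :=
  match _arr.filter (fun v => decide (0 ≤ v) && decide (v ≤ maxNum)) with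
  | [] => 0
  | x :: t => bScan _arr (t.foldl max x) _arr.length   -- max(cand) is the running-max fold (PySem max?_id_cons)

-- ===== PRECONDITION & SPEC =====
def Spec_getMaxPosition (_arr : List Int) (maxNum : Int) (out : Int) : Prop := out = getMaxPosition_alt _arr maxNum
instance (_arr : List Int) (maxNum : Int) (out : Int) : Decidable (Spec_getMaxPosition _arr maxNum out) := by unfold Spec_getMaxPosition; infer_instance

-- ===== CLAIM (what is proved, stated in full; the proofs are below) =====
def Claim_equal_getMaxPosition : Prop := ∀ (_arr : List Int) (maxNum : Int), Dom_getMaxPosition _arr maxNum → Spec_getMaxPosition _arr maxNum (getMaxPosition _arr maxNum)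

-- ===== LEMMAS AND PROOFS =====

-- the whole fold state of A
def aFold (maxNum : Int) (arr : List Int) : Int × Int :=
  (PySem.List.enumerate arr 0).foldl
    (fun (st : Int × Int) (p : Int × Int) =>
      if p.2 ≥ st.1 ∧ p.2 ≤ maxNum then (p.2, p.1) else st) (0, 0)

lemma bScan_append (arr : List Int) (y M : Int) :
    ∀ k, k ≤ arr.length → bScan (arr ++ [y]) M k = bScan arr M k := by
  intro k
  induction k with
  | zero => intro _; rfl
  | succ n ih =>
    intro h
    have hn : n < arr.length := h
    have hg : (arr ++ [y]).getD n 0 = arr.getD n 0 := by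
      simp [List.getD, List.getElem?_append_left hn]
    simp only [bScan, hg, ih (Nat.le_of_lt hn)]

lemma aFold_inv (maxNum : Int) (arr : List Int) :
    (match arr.filter (fun v => decide (0 ≤ v) && decide (v ≤ maxNum)) with
     | [] => aFold maxNum arr = (0, 0)
     | x :: t =>
        let M := t.foldl max x
        aFold maxNum arr = (M, bScan arr M arr.length) ∧ 0 ≤ M ∧ M ≤ maxNum) := by
  induction arr using List.reverseRecOn with
  | nil => simp [aFold, PySem.List.enumerate]
  | append_singleton l y ih =>
    have hfold : aFold maxNum (l ++ [y]) =
        (if y ≥ (aFold maxNum l).1 ∧ y ≤ maxNum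
         then (y, (l.length : Int)) else aFold maxNum l) := by
      simp [aFold, PySem.List.enumerate_append, PySem.List.enumerate_cons,
        PySem.List.enumerate_nil, List.foldl_append]
    have hfilter : (l ++ [y]).filter (fun v => decide (0 ≤ v) && decide (v ≤ maxNum)) =
        l.filter (fun v => decide (0 ≤ v) && decide (v ≤ maxNum)) ++
          (if 0 ≤ y ∧ y ≤ maxNum then [y] else []) := by
      by_cases h : 0 ≤ y ∧ y ≤ maxNum <;> simp [List.filter_append, h]
    have htop : (l ++ [y]).getD l.length 0 = y := by
      simp [List.getD]
    have hlen : (l ++ [y]).length = l.length + 1 := by simp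
    cases hc : l.filter (fun v => decide (0 ≤ v) && decide (v ≤ maxNum)) with
    | nil =>
      rw [hc] at ih
      simp only [hc, List.nil_append] at hfilter
      by_cases hy : 0 ≤ y ∧ y ≤ maxNum
      · simp only [hfilter, if_pos hy]
        have hstate : aFold maxNum (l ++ [y]) = (y, (l.length : Int)) := by
          rw [hfold, ih]; simp [hy.1, hy.2]
        refine ⟨?_, hy.1, hy.2⟩
        rw [List.foldl_nil, hstate, hlen]
        simp only [bScan]
        rw [htop, if_pos rfl]
      · simp only [hfilter, if_neg hy]
        rw [hfold, ih]
        have hcond : ¬ (y ≥ 0 ∧ y ≤ maxNum) := by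
          intro h; exact hy ⟨h.1, h.2⟩
        simp [hcond]
    | cons x t =>
      rw [hc] at ih
      obtain ⟨hst, hM0, hMmax⟩ := ih
      by_cases hy : 0 ≤ y ∧ y ≤ maxNum
      · simp only [hfilter, hc, if_pos hy, List.cons_append]
        by_cases hge : t.foldl max x ≤ y
        · -- new max is y, recorded at the last position
          have hM' : (t ++ [y]).foldl max x = y := by
            rw [List.foldl_append]; simp [max_eq_right hge]
          have hstate : aFold maxNum (l ++ [y]) = (y, (l.length : Int)) := by
            rw [hfold, hst]; simp [hge, hy.2]
          simp only [hM']
          refine ⟨?_, hy.1, hy.2⟩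
          rw [hstate, hlen]
          simp only [bScan]
          rw [htop, if_pos rfl]
        · -- y below the max: nothing changes
          rw [not_le] at hge
          have hM' : (t ++ [y]).foldl max x = t.foldl max x := by
            rw [List.foldl_append]; simp [max_eq_left (le_of_lt hge)]
          have hstate : aFold maxNum (l ++ [y]) = (t.foldl max x, bScan l (t.foldl max x) l.length) := by
            rw [hfold, hst]
            have hcond : ¬ (y ≥ t.foldl max x ∧ y ≤ maxNum) := by
              intro h; exact absurd h.1 (not_le.mpr hge)
            simp [hcond]
          simp only [hM']
          refine ⟨?_, hM0, hMmax⟩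
          rw [hstate, hlen]
          simp only [bScan]
          rw [htop, if_neg (ne_of_lt hge), bScan_append l y _ l.length (le_refl _)]
      · -- y not eligible: filter, max and state all unchanged
        simp only [hfilter, hc, if_neg hy, List.append_nil]
        have hyne : y ≠ t.foldl max x := by
          intro h; subst h; exact hy ⟨hM0, hMmax⟩
        have hstate : aFold maxNum (l ++ [y]) = (t.foldl max x, bScan l (t.foldl max x) l.length) := by
          rw [hfold, hst]
          have hcond : ¬ (y ≥ t.foldl max x ∧ y ≤ maxNum) := by
            rintro ⟨h1, h2⟩
            rcases not_and_or.mp hy with h | h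
            · exact h (le_trans hM0 h1)
            · exact h h2
          simp [hcond]
        refine ⟨?_, hM0, hMmax⟩
        rw [hstate, hlen]
        simp only [bScan]
        rw [htop, if_neg hyne, bScan_append l y _ l.length (le_refl _)]

-- ===== VERDICT (by name: the statement is the Claim_ definition above) =====
theorem getMaxPosition_spec : Claim_equal_getMaxPosition := by
  intro arr maxNum _
  unfold Spec_getMaxPosition getMaxPosition getMaxPosition_alt
  have h := aFold_inv maxNum arr
  cases hc : arr.filter (fun v => decide (0 ≤ v) && decide (v ≤ maxNum)) with
  | nil =>
    rw [hc] at h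
    simpa [aFold] using congrArg Prod.snd h
  | cons x t =>
    rw [hc] at h
    obtain ⟨hst, _, _⟩ := h
    simpa [aFold] using congrArg Prod.snd hst
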